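-- pv_equiv track=rewrite | github.com/ErenBtrk/PythonItertoolExercises | Exercise8.py | iter_func
-- ===== SOURCE A (Python) =====
-- def iter_func(iterable):
--     dict1 = {}
--     iterator = iter(iterable)
--     while True:
--         try:
--             element = next(iterator)
--             if(element in dict1):
--                 dict1[element].append(element)
--             else:
--                 new_list = []
--                 new_list.append(element)
--                 dict1[element] = new_list
--         except StopIteration:
--             break
--     return dict1
-- ===== SOURCE B (Python) =====
-- def iter_func(iterable):
--     counts = {}
--     for element in iterable:
--         counts[element] = counts.get(element, 0) + 1
--     return {element: [element] * count for element, count in counts.items()}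
-- ===== Notes on version B (the rewrite author's own statement) =====
-- stated objective: alternative
-- what changed: Replaces A's single-pass build of per-key occurrence lists (append into a growing dict of lists) by a count-then-build scheme: one pass counting occurrences in a plain dict, then a dict comprehension producing key -> [key]*count.
import Mathlib
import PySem

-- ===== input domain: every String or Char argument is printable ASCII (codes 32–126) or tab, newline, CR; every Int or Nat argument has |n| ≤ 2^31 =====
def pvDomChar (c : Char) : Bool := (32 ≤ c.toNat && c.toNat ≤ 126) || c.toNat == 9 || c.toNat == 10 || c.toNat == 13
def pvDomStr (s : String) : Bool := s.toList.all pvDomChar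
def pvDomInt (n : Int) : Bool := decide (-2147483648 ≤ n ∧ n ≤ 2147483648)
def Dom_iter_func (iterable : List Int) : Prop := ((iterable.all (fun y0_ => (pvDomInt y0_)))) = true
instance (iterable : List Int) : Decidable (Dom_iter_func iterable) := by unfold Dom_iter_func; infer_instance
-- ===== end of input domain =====

-- B replaces A's single-pass append-into-dict-of-lists by a count-then-build scheme (count occurrences, then key ↦ [key]*count); same return value, same cost.

-- ===== PORT A =====
-- A: loop over the iterable; if the element is already a key, append it to its list, else start a new singleton list.
def iter_func (iterable : List Int) : List (Int × List Int) :=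
  (iterable.foldl (fun d e =>
      if d.contains e then d.modify e [] (fun l => l ++ [e])
      else d.insert e [e]) (PySem.Dict.empty : PySem.Dict Int (List Int))).items

-- ===== PORT B =====
-- B: one counting pass (counts[e] = counts.get(e,0)+1), then a comprehension k ↦ [k]*count.
def iter_func_alt (iterable : List Int) : List (Int × List Int) :=
  ((iterable.foldl (fun d e => d.insert e (d.getD e 0 + 1))
      (PySem.Dict.empty : PySem.Dict Int Int)).items).map
    (fun p => (p.1, List.replicate p.2.toNat p.1))

-- ===== PRECONDITION & SPEC =====
def Spec_iter_func (iterable : List Int) (out : List (Int × List Int)) : Prop := out = iter_func_alt iterable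
instance (iterable : List Int) (out : List (Int × List Int)) : Decidable (Spec_iter_func iterable out) := by unfold Spec_iter_func; infer_instance

-- ===== CLAIM (what is proved, stated in full; the proofs are below) =====
def Claim_equal_iter_func : Prop := ∀ (iterable : List Int), Dom_iter_func iterable → Spec_iter_func iterable (iter_func iterable)

-- ===== LEMMAS AND PROOFS =====

-- A's branch is exactly 'modify e [] (· ++ [e])': when the key is absent both add the entry (e, [e]).
lemma iter_func_step_eq_modify (d : PySem.Dict Int (List Int)) (e : Int) :
    (if d.contains e then d.modify e [] (fun l => l ++ [e]) else d.insert e [e])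
      = d.modify e [] (fun l => l ++ [e]) := by
  by_cases h : d.contains e
  · simp [h]
  · rw [if_neg (by simp [h]), PySem.Dict.modify,
      PySem.Dict.getD_of_not_contains (h := by simpa using h)]
    simp

-- A's result, characterised: one entry per distinct element (first-seen order), carrying its occurrences.
lemma iter_func_eq (xs : List Int) :
    iter_func xs = (PySem.Set.ofList xs).map (fun k => (k, List.replicate (xs.count k) k)) := by
  unfold iter_func
  simp only [iter_func_step_eq_modify]
  set F := xs.foldl (fun d e => d.modify e [] (fun l => l ++ [e]))
      (PySem.Dict.empty : PySem.Dict Int (List Int)) with hF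
  have hkeys : F.keys = PySem.Set.ofList xs := by
    rw [hF, PySem.Dict.keys_foldl_modify]
    simp [PySem.Set.update, PySem.Set.ofList_eq_foldl, PySem.Dict.keys_empty]
  have hnodup : F.keys.Nodup := by
    rw [hkeys]; exact PySem.Set.nodup_ofList xs
  have hget : ∀ c : Int, F.getD c [] = List.replicate (xs.count c) c := by
    intro c
    have : F = (xs.map (fun x => (x, x))).foldl
        (fun d p => d.modify p.1 [] (fun l => l ++ [p.2])) PySem.Dict.empty := by
      rw [hF, List.foldl_map]
    rw [this, PySem.Dict.getD_foldl_modify_append]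
    simp only [List.filter_map, List.map_map, Function.comp_def]
    rw [List.filter_beq, List.map_id']
    simp
  rw [PySem.Dict.items_eq_map_keys F hnodup [], hkeys]
  exact List.map_congr_left (fun k _ => by rw [hget k])

-- B's result, characterised the same way: the counter's items mapped through k ↦ [k]*count.
lemma iter_func_alt_eq (xs : List Int) :
    iter_func_alt xs = (PySem.Set.ofList xs).map (fun k => (k, List.replicate (xs.count k) k)) := by
  unfold iter_func_alt
  rw [PySem.Dict.foldl_insert_getD_add_one_eq_counter, PySem.Dict.items_counter]
  simp [List.map_map, Function.comp]

-- ===== VERDICT (by name: the statement is the Claim_ definition above) =====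
theorem iter_func_spec : Claim_equal_iter_func := by
  intro xs _
  unfold Spec_iter_func
  rw [iter_func_eq, iter_func_alt_eq]
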